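-- pv_equiv track=rewrite | github.com/MrHamdulay/csc3-capstone | examples/data/Assignment_7/thnsik001/push.py | deleteup
-- ===== SOURCE A (Python) =====
-- def deleteup(copy):
--     count =0
--     while count < len(copy):
--         if copy[count] == 0:
--             del copy[count]
--             count-=1
--         count +=1
--     for y in range(4-len(copy)):
--         copy.append(0)
--     return copy
-- ===== SOURCE B (Python) =====
-- def deleteup(copy):
--     # One-pass filter + pad; mutates the argument in place like A and returns it.
--     copy[:] = [x for x in copy if x != 0]
--     copy.extend([0] * (4 - len(copy)))
--     return copy
-- ===== Notes on version B (the rewrite author's own statement) =====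
-- stated objective: simpler
-- what changed: Replaces the index-walking in-place deletion loop (del with manual counter adjustment) and the append loop by a single-pass list-comprehension filter assigned back via slice assignment plus one extend for padding.
import Mathlib
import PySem

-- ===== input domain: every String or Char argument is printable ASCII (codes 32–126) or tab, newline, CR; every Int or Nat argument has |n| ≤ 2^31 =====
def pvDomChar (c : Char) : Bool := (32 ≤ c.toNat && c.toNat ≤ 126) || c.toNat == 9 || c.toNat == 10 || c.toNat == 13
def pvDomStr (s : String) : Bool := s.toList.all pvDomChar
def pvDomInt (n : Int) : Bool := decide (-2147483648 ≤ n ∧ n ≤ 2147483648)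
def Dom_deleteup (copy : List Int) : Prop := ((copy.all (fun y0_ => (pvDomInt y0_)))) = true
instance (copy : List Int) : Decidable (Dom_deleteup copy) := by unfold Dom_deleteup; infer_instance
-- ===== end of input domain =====

-- B replaces A's index-walking in-place deletion loop by a single-pass filter plus one pad
-- (objective: simpler); both mutate the argument in place in Python, equivalence proved on return value.
-- ===== PORT A =====
-- while loop: index walk with in-place deletion; measure len - count
def deleteupLoop (copy : List Int) (count : Nat) : List Int :=
  if h : count < copy.length then
    if copy[count] == 0 then
      -- del copy[count]; count -= 1; count += 1  (net: same count, shorter list)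
      deleteupLoop (copy.eraseIdx count) count
    else
      deleteupLoop copy (count + 1)
  else
    copy
termination_by copy.length - count
decreasing_by
  · have := copy.length_eraseIdx (i := count); simp only [if_pos h] at this; omega
  · omega

def deleteup (copy : List Int) : List Int :=
  let r := deleteupLoop copy 0
  -- for y in range(4 - len(copy)): copy.append(0)
  r ++ List.replicate (4 - r.length) 0

-- ===== PORT B =====
def deleteup_alt (copy : List Int) : List Int :=
  let kept := copy.filter (fun x => x != 0)
  kept ++ List.replicate (4 - kept.length) 0

-- ===== PRECONDITION & SPEC =====
def Spec_deleteup (copy : List Int) (out : List Int) : Prop := out = deleteup_alt copy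
instance (copy : List Int) (out : List Int) : Decidable (Spec_deleteup copy out) := by unfold Spec_deleteup; infer_instance

-- ===== CLAIM (what is proved, stated in full; the proofs are below) =====
def Claim_equal_deleteup : Prop := ∀ (copy : List Int), Dom_deleteup copy → Spec_deleteup copy (deleteup copy)

-- ===== LEMMAS AND PROOFS =====

theorem deleteupLoop_eq (copy : List Int) (count : Nat) :
    deleteupLoop copy count = copy.take count ++ (copy.drop count).filter (fun x => x != 0) := by
  by_cases h : count < copy.length
  · rw [deleteupLoop]
    have hx : copy.drop count = copy[count] :: copy.drop (count + 1) :=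
      (List.drop_eq_getElem_cons h)
    by_cases h0 : copy[count] = 0
    · simp only [dif_pos h, h0]
      simp only [beq_self_eq_true, if_true]
      rw [deleteupLoop_eq (copy.eraseIdx count) count]
      rw [List.eraseIdx_eq_take_drop_succ]
      have hlen : (copy.take count).length = count := by
        simp [List.length_take]; omega
      rw [List.take_append_of_le_length (by omega), List.take_take,
          List.drop_append_of_le_length (by omega)]
      simp [hx, h0]
    · have hb : (copy[count] == (0:Int)) = false := by simp [h0]
      simp only [dif_pos h, hb, Bool.false_eq_true, if_false]
      rw [deleteupLoop_eq copy (count + 1), hx, List.filter_cons,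
          if_pos (show (copy[count] != 0) = true by simpa using h0)]
      rw [List.take_succ_eq_append_getElem h, List.append_assoc, List.singleton_append]
  · rw [deleteupLoop]
    simp only [dif_neg h]
    rw [List.take_of_length_le (by omega), List.drop_of_length_le (by omega)]
    simp
termination_by copy.length - count
decreasing_by
  · have := copy.length_eraseIdx (i := count); simp only [if_pos h] at this; omega
  · omega

-- ===== VERDICT =====
theorem deleteup_spec : Claim_equal_deleteup := by
  intro copy _
  unfold Spec_deleteup deleteup deleteup_alt
  simp [deleteupLoop_eq]
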